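-- pv_equiv track=rewrite | github.com/tkddk0108/codingPrac | 프로그래머스/0/181932. 코드 처리하기/코드 처리하기.py | solution
-- ===== SOURCE A (Python) =====
-- def solution(code):
--     answer = ''
--     mode = 0
--     iCount = 0
--     ret = ''
--
--     # 이 부분에서 TypeError: 'str' object cannot be interpreted as an integer 가 발생했다
--     # 왜 그런가! 내가 'for j in code' 와 같이 j가 문자열의 문자 자체인 경우인데 숫자로 다루려고 했기 때문
--     # 이를 해결하기 위해서는 j는 문자열에서 인덱스를 참조하고 code[j]와 같은 방식으로 문자를 다루어야 함
--
--     for j in range(len(code)):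
--         if mode == 0:
--             if j % 2 == 0 and code[j] != '1':
--                 ret += code[j]
--             elif code[j] == '1':
--                 mode = 1
--         else:
--             if j % 2 == 1 and code[j] != '1':
--                 ret += code[j]
--             elif code[j] == '1':
--                 mode = 0
--
--     if ret == '':
--         answer = "EMPTY"
--     else:
--         answer = ret
--
--     return answer
-- ===== SOURCE B (Python) =====
-- def solution(code):
--     out = []
--     offset = 0
--     for k, seg in enumerate(code.split('1')):
--         mode = k % 2
--         for i, c in enumerate(seg):
--             if (offset + i) % 2 == mode:
--                 out.append(c)
--         offset += len(seg) + 1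
--     s = ''.join(out)
--     return s if s else "EMPTY"
-- ===== Notes on version B (the rewrite author's own statement) =====
-- stated objective: alternative
-- what changed: Replaces A's per-character mode-toggling state machine with split-on-'1' into segments, where segment index parity gives the mode and a running absolute offset gives the position parity used to filter each segment.
import Mathlib
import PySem

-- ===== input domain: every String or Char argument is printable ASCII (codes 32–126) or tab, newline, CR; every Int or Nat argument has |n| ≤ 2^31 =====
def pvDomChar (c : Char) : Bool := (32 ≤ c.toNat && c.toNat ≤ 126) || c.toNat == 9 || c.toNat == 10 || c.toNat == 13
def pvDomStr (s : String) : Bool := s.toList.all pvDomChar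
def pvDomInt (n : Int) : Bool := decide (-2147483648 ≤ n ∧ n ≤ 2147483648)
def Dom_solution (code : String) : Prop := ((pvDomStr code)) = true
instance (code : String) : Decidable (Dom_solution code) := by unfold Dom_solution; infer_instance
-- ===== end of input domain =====

-- B replaces A's mode-toggling state machine by splitting on '1' and filtering each
-- segment by absolute-position parity (objective: alternative decomposition, same cost).

-- ===== PORT A =====
-- the for-loop over j in range(len(code)), carrying (mode, ret); j is the index of the head char
def aLoop : List Char → Nat → Nat → List Char → List Char
  | [], _, _, ret => ret
  | c :: t, j, mode, ret =>
    if mode = 0 then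
      if j % 2 = 0 ∧ c ≠ '1' then aLoop t (j + 1) mode (ret ++ [c])
      else if c = '1' then aLoop t (j + 1) 1 ret
      else aLoop t (j + 1) mode ret
    else
      if j % 2 = 1 ∧ c ≠ '1' then aLoop t (j + 1) mode (ret ++ [c])
      else if c = '1' then aLoop t (j + 1) 0 ret
      else aLoop t (j + 1) mode ret

def solution (code : String) : String :=
  let ret := aLoop code.toList 0 0 []
  if ret = [] then "EMPTY" else String.ofList ret

-- ===== PORT B =====
-- code.split('1') on the character list
def segsB : List Char → List (List Char)
  | [] => [[]]
  | c :: t =>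
    if c = '1' then [] :: segsB t
    else
      match segsB t with
      | s :: ss => (c :: s) :: ss
      | [] => [[c]]

-- inner loop: characters of one segment at absolute positions off, off+1, …; keep when parity = mode
def bSeg : List Char → Nat → Nat → List Char
  | [], _, _ => []
  | c :: t, off, m => (if off % 2 = m then [c] else []) ++ bSeg t (off + 1) m

-- outer loop over segments with running offset and segment index k
def bLoop : List (List Char) → Nat → Nat → List Char → List Char
  | [], _, _, acc => acc
  | s :: ss, off, k, acc => bLoop ss (off + s.length + 1) (k + 1) (acc ++ bSeg s off (k % 2))

def solution_alt (code : String) : String :=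
  let r := bLoop (segsB code.toList) 0 0 []
  if r = [] then "EMPTY" else String.ofList r

-- ===== PRECONDITION & SPEC =====
def Spec_solution (code : String) (out : String) : Prop := out = solution_alt code
instance (code : String) (out : String) : Decidable (Spec_solution code out) := by unfold Spec_solution; infer_instance

-- ===== CLAIM (what is proved, stated in full; the proofs are below) =====
def Claim_equal_solution : Prop := ∀ (code : String), Dom_solution code → Spec_solution code (solution code)

-- ===== LEMMAS AND PROOFS =====

-- common reference function: position j, mode m ∈ {0,1}; '1' toggles, others kept when j % 2 = m
def gRef : List Char → Nat → Nat → List Char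
  | [], _, _ => []
  | c :: t, j, m =>
    if c = '1' then gRef t (j + 1) (1 - m)
    else (if j % 2 = m then [c] else []) ++ gRef t (j + 1) m

theorem aLoop_eq_gRef (cs : List Char) : ∀ (j m : Nat) (ret : List Char), m = 0 ∨ m = 1 →
    aLoop cs j m ret = ret ++ gRef cs j m := by
  induction cs with
  | nil => intro j m ret _; simp [aLoop, gRef]
  | cons c t ih =>
    intro j m ret hm
    rcases hm with h | h <;> subst h
    · by_cases h1 : c = '1'
      · subst h1
        simp [aLoop, gRef, ih (j+1) 1 ret (Or.inr rfl)]
      · by_cases hj : j % 2 = 0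
        · simp [aLoop, gRef, hj, h1, ih (j+1) 0 (ret ++ [c]) (Or.inl rfl)]
        · simp [aLoop, gRef, hj, h1, ih (j+1) 0 ret (Or.inl rfl)]
    · by_cases h1 : c = '1'
      · subst h1
        simp [aLoop, gRef, ih (j+1) 0 ret (Or.inl rfl)]
      · by_cases hj : j % 2 = 1
        · simp [aLoop, gRef, hj, h1, ih (j+1) 1 (ret ++ [c]) (Or.inr rfl)]
        · simp [aLoop, gRef, hj, h1, ih (j+1) 1 ret (Or.inr rfl)]

theorem segsB_ne_nil (cs : List Char) : segsB cs ≠ [] := by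
  cases cs with
  | nil => simp [segsB]
  | cons c t =>
    simp only [segsB]
    split
    · simp
    · cases h : segsB t <;> simp

-- one character consumed from the head segment
theorem bLoop_cons_head (c : Char) (s : List Char) (ss : List (List Char)) (off k : Nat)
    (acc : List Char) :
    bLoop ((c :: s) :: ss) off k acc
      = bLoop (s :: ss) (off + 1) k (acc ++ (if off % 2 = k % 2 then [c] else [])) := by
  simp only [bLoop, bSeg, List.length_cons, List.append_assoc]
  have : off + (s.length + 1) + 1 = off + 1 + s.length + 1 := by omega
  rw [this]

theorem bLoop_eq_gRef (cs : List Char) : ∀ (off k : Nat) (acc : List Char),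
    bLoop (segsB cs) off k acc = acc ++ gRef cs off (k % 2) := by
  induction cs with
  | nil => intro off k acc; simp [segsB, bLoop, bSeg, gRef]
  | cons c t ih =>
    intro off k acc
    by_cases h1 : c = '1'
    · subst h1
      have hk : (k + 1) % 2 = 1 - k % 2 := by omega
      simp [segsB, bLoop, bSeg, gRef, ih (off + 1) (k + 1) acc, hk]
    · have hne := segsB_ne_nil t
      cases h : segsB t with
      | nil => exact absurd h hne
      | cons s ss =>
        have : segsB (c :: t) = (c :: s) :: ss := by
          simp [segsB, h1, h]
        rw [this, bLoop_cons_head]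
        have := ih (off + 1) k (acc ++ (if off % 2 = k % 2 then [c] else []))
        rw [h] at this
        rw [this]
        simp [gRef, h1, List.append_assoc]

-- ===== VERDICT (by name: the statement is the Claim_ definition above) =====
theorem solution_spec : Claim_equal_solution := by
  intro code _
  unfold Spec_solution solution solution_alt
  rw [aLoop_eq_gRef code.toList 0 0 [] (Or.inl rfl), bLoop_eq_gRef code.toList 0 0 []]
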